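-- pv_equiv track=rewrite | github.com/AndromedaOMA/Deep_Learning_in_NLP---Laboratories | Labs/Lab02/n_gram.py | generate_ngram_contexts
-- ===== SOURCE A (Python) =====
-- def generate_ngram_contexts(sentences_with_markers, n):
--     pairs = []
--     for sent in sentences_with_markers:
--         for i in range(n - 1, len(sent)):
--             history = tuple(sent[i - (n - 1):i]) if n > 1 else tuple()
--             next_tok = sent[i]
--             pairs.append((history, next_tok))
--     return pairs
-- ===== SOURCE B (Python) =====
-- def generate_ngram_contexts(sentences_with_markers, n):
--     pairs = []
--     for sent in sentences_with_markers:
--         if len(sent) < n: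
--             continue  # too short to contain any n-gram window
--         for g in zip(*(sent[i:] for i in range(n))):
--             pairs.append((g[:-1], g[-1]))
--     return pairs
-- ===== Notes on version B (the rewrite author's own statement) =====
-- stated objective: idiomatic
-- what changed: B skips sentences shorter than n and builds each remaining sentence's n-grams as sliding windows via zip of n shifted slices, splitting every window into (history, next_token), replacing A's explicit index arithmetic sent[i-(n-1):i] over range(n-1, len(sent)).
-- outside the precondition, e.g. on generate_ngram_contexts([['a', 'b']], 0): A returns [((), 'b'), ((), 'a'), ((), 'b')], B returns []; on generate_ngram_contexts([[]], 0): A raises IndexError, B returns []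
import Mathlib
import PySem

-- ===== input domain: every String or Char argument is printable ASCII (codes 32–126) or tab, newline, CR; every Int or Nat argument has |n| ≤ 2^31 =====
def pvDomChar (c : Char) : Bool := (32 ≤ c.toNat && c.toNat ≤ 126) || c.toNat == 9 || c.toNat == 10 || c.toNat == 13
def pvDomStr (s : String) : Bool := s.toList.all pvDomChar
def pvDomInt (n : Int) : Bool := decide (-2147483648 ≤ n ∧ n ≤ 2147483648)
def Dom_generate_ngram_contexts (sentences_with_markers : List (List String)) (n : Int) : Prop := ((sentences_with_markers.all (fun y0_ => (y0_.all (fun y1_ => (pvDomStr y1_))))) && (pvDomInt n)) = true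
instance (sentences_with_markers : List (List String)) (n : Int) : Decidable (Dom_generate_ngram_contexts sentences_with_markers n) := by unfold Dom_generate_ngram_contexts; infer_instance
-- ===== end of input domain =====

-- B builds each sentence's n-grams as sliding windows (zip of n shifted slices) and splits
-- each window into (history, next_token), instead of A's explicit index arithmetic; idiomatic, same cost.

-- ===== PORT A =====
def generate_ngram_contexts (sentences_with_markers : List (List String)) (n : Int) : List (List String × String) :=
  sentences_with_markers.foldl (fun pairs sent =>
    (PySem.List.pyRange (n - 1) (PySem.List.len sent) 1).foldl (fun pairs i =>
      let history : List String :=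
        if n > 1 then PySem.List.slice sent (some (i - (n - 1))) (some i) else []
      let next_tok : String := PySem.List.pyGetD sent i ""   -- sent[i]; in range for every i of the loop under Pre_ (1 ≤ n)
      pairs ++ [(history, next_tok)]) pairs) []

-- ===== PORT B =====
-- Python zip(*lists): take the heads of all lists (none if some list is empty) …
def pvSplitHeads {α : Type} : List (List α) → Option (List α × List (List α))
  | [] => some ([], [])
  | [] :: _ => none
  | (h :: t) :: rest => (pvSplitHeads rest).map (fun p => (h :: p.1, t :: p.2))

-- … repeatedly, with enough fuel (zip stops at the shortest list, so the first list's length suffices)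
def pvZipAux {α : Type} : Nat → List (List α) → List (List α)
  | 0, _ => []
  | Nat.succ k, ls =>
    match pvSplitHeads ls with
    | none => []
    | some (hs, ts) => hs :: pvZipAux k ts

def pvZip {α : Type} : List (List α) → List (List α)
  | [] => []                       -- Python zip() of no iterables is empty
  | l :: ls => pvZipAux l.length (l :: ls)

def generate_ngram_contexts_alt (sentences_with_markers : List (List String)) (n : Int) : List (List String × String) :=
  sentences_with_markers.foldl (fun pairs sent =>
    if PySem.List.len sent < n then pairs   -- too short to contain any n-gram window
    else (pvZip ((PySem.List.pyRange 0 n 1).map (fun i => PySem.List.slice sent (some i) none))).foldl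
      (fun pairs g =>
        pairs ++ [(PySem.List.slice g none (some (-1)), PySem.List.pyGetD g (-1) "")]) pairs) []

-- ===== PRECONDITION & SPEC =====
-- Pre_ excludes n ≤ 0: there A's range(n-1, len(sent)) reaches the negative index -1, so sent[-1]
-- accidentally wraps to the last token (or raises IndexError on an empty sentence); B yields no windows there.
def Pre_generate_ngram_contexts (sentences_with_markers : List (List String)) (n : Int) : Prop := 1 ≤ n
instance (sentences_with_markers : List (List String)) (n : Int) : Decidable (Pre_generate_ngram_contexts sentences_with_markers n) := by unfold Pre_generate_ngram_contexts; infer_instance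

def pvWitness_generate_ngram_contexts : List (List String) × Int := ([["<s>", "a", "b", "</s>"], ["<s>", "c", "</s>"]], 2)

def Spec_generate_ngram_contexts (sentences_with_markers : List (List String)) (n : Int) (out : List (List String × String)) : Prop := out = generate_ngram_contexts_alt sentences_with_markers n
instance (sentences_with_markers : List (List String)) (n : Int) (out : List (List String × String)) : Decidable (Spec_generate_ngram_contexts sentences_with_markers n out) := by unfold Spec_generate_ngram_contexts; infer_instance

-- ===== CLAIM (what is proved, stated in full; the proofs are below) =====
def Claim_equal_generate_ngram_contexts : Prop := ∀ (sentences_with_markers : List (List String)) (n : Int), Dom_generate_ngram_contexts sentences_with_markers n → Pre_generate_ngram_contexts sentences_with_markers n → Spec_generate_ngram_contexts sentences_with_markers n (generate_ngram_contexts sentences_with_markers n)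

-- ===== LEMMAS AND PROOFS =====

def pvShifts {α : Type} (L : List α) (m : Nat) : List (List α) :=
  (List.range m).map (fun i => L.drop i)
lemma pvShifts_succ {α : Type} (L : List α) (m : Nat) :
    pvShifts L (m + 1) = L :: pvShifts (L.drop 1) m := by
  simp [pvShifts, List.range_succ_eq_map, List.map_map, Function.comp_def]

lemma pvSplitHeads_shifts_of_le {α : Type} (m : Nat) :
    ∀ (L : List α), m ≤ L.length →
      pvSplitHeads (pvShifts L m) = some (L.take m, pvShifts (L.drop 1) m) := by
  induction m with
  | zero => intro L h; simp [pvShifts, pvSplitHeads]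
  | succ k ih =>
    intro L h
    match L with
    | [] => simp at h
    | y :: ys =>
      rw [pvShifts_succ]
      simp only [List.drop_one, List.tail_cons]
      rw [show pvSplitHeads ((y :: ys) :: pvShifts ys k) =
        (pvSplitHeads (pvShifts ys k)).map (fun p => (y :: p.1, ys :: p.2)) from rfl]
      rw [ih ys (by simpa using h)]
      simp [pvShifts_succ, List.drop_one]

lemma pvSplitHeads_shifts_of_lt {α : Type} (m : Nat) :
    ∀ (L : List α), L.length < m → pvSplitHeads (pvShifts L m) = none := by
  induction m with
  | zero => intro L h; omega
  | succ k ih =>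
    intro L h
    match L with
    | [] =>
      rw [pvShifts_succ]
      rfl
    | y :: ys =>
      rw [pvShifts_succ]
      simp only [List.drop_one, List.tail_cons]
      rw [show pvSplitHeads ((y :: ys) :: pvShifts ys k) =
        (pvSplitHeads (pvShifts ys k)).map (fun p => (y :: p.1, ys :: p.2)) from rfl]
      rw [ih ys (by simpa using h)]
      rfl
lemma pvZipAux_shifts {α : Type} (m : Nat) (hm : 1 ≤ m) :
    ∀ (fuel : Nat) (L : List α), L.length ≤ fuel →
      pvZipAux fuel (pvShifts L m) =
        (List.range (L.length + 1 - m)).map (fun k => (L.drop k).take m) := by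
  intro fuel
  induction fuel with
  | zero =>
    intro L h
    have : L.length = 0 := by omega
    have : L.length + 1 - m = 0 := by omega
    simp [pvZipAux, this]
  | succ f ih =>
    intro L h
    by_cases hlen : m ≤ L.length
    · rw [show pvZipAux (f+1) (pvShifts L m) =
        (match pvSplitHeads (pvShifts L m) with
         | none => []
         | some (hs, ts) => hs :: pvZipAux f ts) from rfl]
      rw [pvSplitHeads_shifts_of_le m L hlen]
      dsimp only
      rw [ih (L.drop 1) (by simp; omega)]
      have h1 : L.length + 1 - m = (L.drop 1).length + 1 - m + 1 := by simp; omega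
      rw [h1, List.range_succ_eq_map]
      simp [List.map_map, Function.comp_def, List.drop_drop]
    · rw [show pvZipAux (f+1) (pvShifts L m) =
        (match pvSplitHeads (pvShifts L m) with
         | none => []
         | some (hs, ts) => hs :: pvZipAux f ts) from rfl]
      rw [pvSplitHeads_shifts_of_lt m L (by omega)]
      dsimp only
      have : L.length + 1 - m = 0 := by omega
      simp [this]

lemma pvZip_shifts {α : Type} (m : Nat) (hm : 1 ≤ m) (L : List α) :
    pvZip (pvShifts L m) =
      (List.range (L.length + 1 - m)).map (fun k => (L.drop k).take m) := by
  match m, hm with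
  | Nat.succ k, _ =>
    rw [pvShifts_succ]
    rw [show pvZip (L :: pvShifts (L.drop 1) k) = pvZipAux L.length (L :: pvShifts (L.drop 1) k) from rfl]
    rw [← pvShifts_succ]
    exact pvZipAux_shifts (k+1) (by omega) L.length L le_rfl
lemma pv_inner_eq (L : List String) (n : Int) (hn : 1 ≤ n) :
    ((PySem.List.pyRange (n - 1) (PySem.List.len L) 1).map (fun i =>
      ((if n > 1 then PySem.List.slice L (some (i - (n - 1))) (some i) else []),
       PySem.List.pyGetD L i ""))) =
    ((pvZip ((PySem.List.pyRange 0 n 1).map (fun i => PySem.List.slice L (some i) none))).map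
      (fun g => (PySem.List.slice g none (some (-1)), PySem.List.pyGetD g (-1) ""))) := by
  set m : Nat := n.toNat with hm
  have hnm : n = (m : Int) := by omega
  have hm1 : 1 ≤ m := by omega
  -- the shifted slices are pvShifts L m
  have hshift : ((PySem.List.pyRange 0 n 1).map (fun i => PySem.List.slice L (some i) none))
      = pvShifts L m := by
    rw [PySem.List.pyRange_one, List.map_map]
    simp only [hnm, Int.sub_zero, Int.toNat_natCast, Function.comp_def, Int.zero_add]
    simp [pvShifts, PySem.List.slice_from_natCast]
  rw [hshift, pvZip_shifts m hm1 L, List.map_map]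
  rw [PySem.List.len_eq, PySem.List.pyRange_one, List.map_map]
  have hN : ((L.length : Int) - (n - 1)).toNat = L.length + 1 - m := by omega
  rw [hN]
  apply List.map_congr_left
  intro k hk
  have hk' : k < L.length + 1 - m := List.mem_range.mp hk
  have hkm : k + m ≤ L.length := by omega
  simp only [Function.comp_def]
  have hw : ((L.drop k).take m).length = m := by
    simp; omega
  have hwne : (L.drop k).take m ≠ [] := by
    intro h0; rw [h0] at hw; simp at hw; omega
  -- second component
  have e2 : (n - 1 + (k : Int)) = ((k + (m - 1) : Nat) : Int) := by
    push_cast; omega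
  have hidx : k + (m - 1) < L.length := by omega
  have snd_eq : PySem.List.pyGetD L (n - 1 + (k : Int)) "" =
      PySem.List.pyGetD ((L.drop k).take m) (-1) "" := by
    rw [e2, PySem.List.pyGetD_natCast, PySem.List.pyGetD_neg_one _ "" hwne]
    rw [List.getLast_eq_getElem]
    simp only [hw]
    rw [List.getElem_take, List.getElem_drop]
    rw [List.getD_eq_getElem _ _ (by omega)]
  -- first component
  have fst_eq : (if n > 1 then PySem.List.slice L (some ((n - 1 + (k:Int)) - (n - 1))) (some (n - 1 + (k:Int))) else [])
      = PySem.List.slice ((L.drop k).take m) none (some (-1)) := by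
    rw [PySem.List.slice_to_neg_one, List.dropLast_eq_take, hw]
    rw [List.take_take]
    by_cases hgt : n > 1
    · rw [if_pos hgt]
      have e1 : ((n - 1 + (k:Int)) - (n - 1)) = ((k : Nat) : Int) := by omega
      rw [e1, e2, PySem.List.slice_natCast]
      congr 1
      omega
    · rw [if_neg hgt]
      have : m = 1 := by omega
      simp [this]
  rw [snd_eq, fst_eq]

lemma pv_outer (sws : List (List String)) (n : Int) (hn : 1 ≤ n) :
    generate_ngram_contexts sws n = generate_ngram_contexts_alt sws n := by
  unfold generate_ngram_contexts generate_ngram_contexts_alt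
  induction sws using List.reverseRecOn with
  | nil => rfl
  | append_singleton xs x ih =>
    simp only [List.foldl_append, List.foldl_cons, List.foldl_nil, ih]
    by_cases hlt : PySem.List.len x < n
    · rw [if_pos hlt, PySem.List.foldl_append_singleton_eq_map]
      have hnil : PySem.List.pyRange (n - 1) (PySem.List.len x) 1 = [] := by
        apply PySem.List.pyRange_one_eq_nil
        rw [PySem.List.len_eq] at hlt ⊢
        omega
      rw [hnil]
      simp
    · rw [if_neg hlt, PySem.List.foldl_append_singleton_eq_map,
        PySem.List.foldl_append_singleton_eq_map, pv_inner_eq x n hn]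

-- ===== VERDICT (by name: the statement is the Claim_ definition above) =====
theorem generate_ngram_contexts_spec : Claim_equal_generate_ngram_contexts :=
  fun sws n _hdom hn => pv_outer sws n hn
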